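-- pv_equiv track=rewrite | github.com/ezalos/ProjectEuler | src/individual_problems/problem_768.py | fill_all_chandeliers_recur
-- ===== SOURCE A (Python) =====
-- def fill_all_chandeliers_recur(board, index, nb_candles, total_candles):
--     if nb_candles == 0:
--         if sum(board) == total_candles:
--             return [board]
--         return
--     all_solutions = []
--     for i in range(index, len(board)):
--         cp_board = board[:]
--         cp_board[i] = 1
--         solution = fill_all_chandeliers_recur(cp_board, i + 1, nb_candles - 1, total_candles)
--         if not solution is None:
--             all_solutions.extend(solution)
--     return all_solutions
-- ===== SOURCE B (Python) =====
-- from itertools import combinations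
--
--
-- def fill_all_chandeliers_recur(board, index, nb_candles, total_candles):
--     slots = range(index, len(board))
--     if nb_candles > len(slots):
--         return []  # more candles than free slots: no placement exists
--     solutions = []
--     for combo in combinations(slots, nb_candles):
--         cp = board[:]
--         for i in combo:
--             cp[i] = 1
--         if sum(cp) == total_candles:
--             solutions.append(cp)
--     return solutions
-- ===== Notes on version B (the rewrite author's own statement) =====
-- stated objective: idiomatic
-- what changed: Replaces the recursive backtracking (copying the board at every node and merging child solution lists) with a single flat loop over itertools.combinations of candidate index tuples, filling one copy per tuple and filtering by the sum; Pre_ restricts to the natural domain of non-negative candle counts (combinations raises ValueError on a negative count while A happens to return []) and excludes index < -len(board) with candles left, where both programs raise IndexError.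
-- intended difference: When nb_candles == 0 and sum(board) != total_candles, A returns None instead of a list; B returns the empty solution list [], the intended value for an enumeration function. — e.g. on fill_all_chandeliers_recur([1], 0, 0, 0): A returns none, B returns some []
-- outside the precondition, e.g. on fill_all_chandeliers_recur([0], 0, -1, 0): A returns [], B raises ValueError
import Mathlib
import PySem

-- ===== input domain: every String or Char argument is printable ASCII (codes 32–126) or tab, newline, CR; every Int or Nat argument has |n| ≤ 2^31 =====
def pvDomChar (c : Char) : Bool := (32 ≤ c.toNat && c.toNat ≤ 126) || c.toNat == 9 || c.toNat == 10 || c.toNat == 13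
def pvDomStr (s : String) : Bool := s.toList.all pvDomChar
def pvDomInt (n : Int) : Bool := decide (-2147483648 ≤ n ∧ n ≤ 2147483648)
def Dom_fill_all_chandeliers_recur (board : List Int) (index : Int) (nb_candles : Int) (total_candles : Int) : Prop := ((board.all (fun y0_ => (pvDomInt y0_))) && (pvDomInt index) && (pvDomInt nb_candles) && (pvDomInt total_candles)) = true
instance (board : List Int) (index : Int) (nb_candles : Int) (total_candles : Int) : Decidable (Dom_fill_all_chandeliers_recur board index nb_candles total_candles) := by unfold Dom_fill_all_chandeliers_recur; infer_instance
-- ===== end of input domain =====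

-- B replaces A's recursive backtracking with a flat loop over itertools.combinations of
-- index tuples filtered by the target sum; on nb_candles = 0 with a wrong sum B returns []
-- where A returns None (stated as D_ below).

-- ===== PORT A =====
-- A's 'for i in range(index, len(board))' loop, as structural recursion over the list of
-- remaining loop indices (the tail of range(index, len) after i IS range(i+1, len), and
-- cp_board keeps board's length, so the recursive call's loop runs over exactly that tail;
-- the callee's 'nb_candles == 0' leaf test is inlined at the call site): cp_board = board[:]
-- with cp_board[i] = 1 (pySet?; none = IndexError, propagated), recursive call,
-- 'if not solution is None: all_solutions.extend(solution)'.
def pvFillLoopA (board : List Int) (nb total : Int) : List Int → Option (List (List Int))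
  | [] => some []
  | i :: rest =>
    match PySem.List.pySet? board i (1 : Int) with
    | none => none  -- IndexError in cp_board[i] = 1
    | some cp =>
      let solution : Option (List (List Int)) :=
        if nb - 1 = 0 then (if cp.sum = total then some [cp] else none)
        else pvFillLoopA cp (nb - 1) total rest
      match pvFillLoopA board nb total rest with
      | none => none
      | some restSols => some (solution.getD [] ++ restSols)

-- literal port of A: nb_candles == 0 leaf (None = none when the sum misses), else the loop
def fill_all_chandeliers_recur (board : List Int) (index : Int) (nb_candles : Int) (total_candles : Int) : Option (List (List Int)) :=
  if nb_candles = 0 then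
    if board.sum = total_candles then some [board] else none
  else
    pvFillLoopA board nb_candles total_candles (PySem.List.pyRange index (board.length : Int) 1)

-- ===== PORT B =====
-- all k-combinations of xs, in the lexicographic order itertools.combinations yields
def pvCombos : List Int → Nat → List (List Int)
  | _, 0 => [[]]
  | [], _ + 1 => []
  | x :: rest, k + 1 => (pvCombos rest k).map (fun c => x :: c) ++ pvCombos rest (k + 1)

-- 'for i in combo: cp[i] = 1' (none = IndexError)
def pvSetAll (b : List Int) : List Int → Option (List Int)
  | [] => some b
  | i :: rest =>
    match PySem.List.pySet? b i (1 : Int) with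
    | none => none
    | some b' => pvSetAll b' rest

-- literal port of B: 'if nb_candles > len(slots): return []' (len(range(index, len)) =
-- max 0 (len - index)), then the combinations loop as a foldlM (the Option threads a
-- possible IndexError, exactly like B's loop body); combinations itself raises ValueError
-- on a negative count, ported as none.
def fill_all_chandeliers_recur_alt (board : List Int) (index : Int) (nb_candles : Int) (total_candles : Int) : Option (List (List Int)) :=
  if max 0 ((board.length : Int) - index) < nb_candles then some []
  else if nb_candles < 0 then none  -- ValueError in combinations
  else
    (pvCombos (PySem.List.pyRange index (board.length : Int) 1) nb_candles.toNat).foldlM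
      (fun acc c =>
        (pvSetAll board c).map (fun cp =>
          if cp.sum = total_candles then acc ++ [cp] else acc))
      ([] : List (List Int))

-- ===== PRECONDITION & SPEC =====
-- Pre_ restricts to the natural domain of non-negative candle counts (on a negative count
-- B's combinations raises ValueError while A happens to return []) and excludes
-- index < -len(board) with candles left, where both programs raise IndexError.
def Pre_fill_all_chandeliers_recur (board : List Int) (index : Int) (nb_candles : Int) (total_candles : Int) : Prop :=
  0 ≤ nb_candles ∧ (nb_candles = 0 ∨ -(board.length : Int) ≤ index)
instance (board : List Int) (index : Int) (nb_candles : Int) (total_candles : Int) : Decidable (Pre_fill_all_chandeliers_recur board index nb_candles total_candles) := by unfold Pre_fill_all_chandeliers_recur; infer_instance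

def pvWitness_fill_all_chandeliers_recur : List Int × Int × Int × Int := ([0, 0, 0], 0, 2, 2)

-- When nb_candles = 0 and the board's sum misses total_candles, A returns None instead of a
-- list; B returns the empty solution list [], the intended value for an enumeration function.
def D_fill_all_chandeliers_recur (board : List Int) (index : Int) (nb_candles : Int) (total_candles : Int) : Prop :=
  nb_candles = 0 ∧ board.sum ≠ total_candles
instance (board : List Int) (index : Int) (nb_candles : Int) (total_candles : Int) : Decidable (D_fill_all_chandeliers_recur board index nb_candles total_candles) := by unfold D_fill_all_chandeliers_recur; infer_instance

def Spec_fill_all_chandeliers_recur (board : List Int) (index : Int) (nb_candles : Int) (total_candles : Int) (out : Option (List (List Int))) : Prop := ¬ D_fill_all_chandeliers_recur board index nb_candles total_candles → out = fill_all_chandeliers_recur_alt board index nb_candles total_candles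
instance (board : List Int) (index : Int) (nb_candles : Int) (total_candles : Int) (out : Option (List (List Int))) : Decidable (Spec_fill_all_chandeliers_recur board index nb_candles total_candles out) := by unfold Spec_fill_all_chandeliers_recur; infer_instance

def pvDiffWitness_fill_all_chandeliers_recur : List Int × Int × Int × Int := ([1], 0, 0, 0)
def pvDiffWitnessOut_fill_all_chandeliers_recur : (Option (List (List Int))) × (Option (List (List Int))) := (none, some [])

-- ===== CLAIM (what is proved, stated in full; the proofs are below) =====
def Claim_unchanged_fill_all_chandeliers_recur : Prop := ∀ (board : List Int) (index : Int) (nb_candles : Int) (total_candles : Int), Dom_fill_all_chandeliers_recur board index nb_candles total_candles → Pre_fill_all_chandeliers_recur board index nb_candles total_candles → Spec_fill_all_chandeliers_recur board index nb_candles total_candles (fill_all_chandeliers_recur board index nb_candles total_candles)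
def Claim_changed_fill_all_chandeliers_recur : Prop := Dom_fill_all_chandeliers_recur (pvDiffWitness_fill_all_chandeliers_recur.1) (pvDiffWitness_fill_all_chandeliers_recur.2.1) (pvDiffWitness_fill_all_chandeliers_recur.2.2.1) (pvDiffWitness_fill_all_chandeliers_recur.2.2.2) ∧ Pre_fill_all_chandeliers_recur (pvDiffWitness_fill_all_chandeliers_recur.1) (pvDiffWitness_fill_all_chandeliers_recur.2.1) (pvDiffWitness_fill_all_chandeliers_recur.2.2.1) (pvDiffWitness_fill_all_chandeliers_recur.2.2.2) ∧ D_fill_all_chandeliers_recur (pvDiffWitness_fill_all_chandeliers_recur.1) (pvDiffWitness_fill_all_chandeliers_recur.2.1) (pvDiffWitness_fill_all_chandeliers_recur.2.2.1) (pvDiffWitness_fill_all_chandeliers_recur.2.2.2) ∧ fill_all_chandeliers_recur (pvDiffWitness_fill_all_chandeliers_recur.1) (pvDiffWitness_fill_all_chandeliers_recur.2.1) (pvDiffWitness_fill_all_chandeliers_recur.2.2.1) (pvDiffWitness_fill_all_chandeliers_recur.2.2.2) = pvDiffWitnessOut_fill_all_chandeliers_recur.1 ∧ fill_all_chandeliers_recur_alt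 (pvDiffWitness_fill_all_chandeliers_recur.1) (pvDiffWitness_fill_all_chandeliers_recur.2.1) (pvDiffWitness_fill_all_chandeliers_recur.2.2.1) (pvDiffWitness_fill_all_chandeliers_recur.2.2.2) = pvDiffWitnessOut_fill_all_chandeliers_recur.2 ∧ pvDiffWitnessOut_fill_all_chandeliers_recur.1 ≠ pvDiffWitnessOut_fill_all_chandeliers_recur.2
def Claim_exact_fill_all_chandeliers_recur : Prop := ∀ (board : List Int) (index : Int) (nb_candles : Int) (total_candles : Int), Dom_fill_all_chandeliers_recur board index nb_candles total_candles → Pre_fill_all_chandeliers_recur board index nb_candles total_candles → D_fill_all_chandeliers_recur board index nb_candles total_candles → fill_all_chandeliers_recur board index nb_candles total_candles ≠ fill_all_chandeliers_recur_alt board index nb_candles total_candles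

-- ===== LEMMAS AND PROOFS =====

-- the common value both sides compute over a list of candidate indices:
-- combinations filtered by the sum
def pvG (b : List Int) (t : Int) (k : Nat) (idxs : List Int) : List (List Int) :=
  (pvCombos idxs k).filterMap
    (fun c => (pvSetAll b c).bind (fun cp => if cp.sum = t then some cp else none))

theorem pvSet_length {xs ys : List Int} {i v : Int}
    (h : PySem.List.pySet? xs i v = some ys) : ys.length = xs.length := by
  unfold PySem.List.pySet? at h
  cases hk : PySem.List.pyIdx? xs.length i with
  | none => rw [hk] at h; simp at h
  | some k => rw [hk] at h; simp at h; subst h; simp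

theorem pvSet_some {b : List Int} {i : Int} (h1 : -(b.length : Int) ≤ i) (h2 : i < (b.length : Int)) :
    ∃ cp, PySem.List.pySet? b i (1 : Int) = some cp := by
  cases hc : PySem.List.pySet? b i (1 : Int) with
  | some cp => exact ⟨cp, rfl⟩
  | none =>
    rw [PySem.List.pySet?_eq_none_iff] at hc
    exact absurd ⟨h1, h2⟩ hc

theorem pvCombos_mem {xs : List Int} {k : Nat} {c : List Int} (hc : c ∈ pvCombos xs k) :
    ∀ y ∈ c, y ∈ xs := by
  induction xs generalizing k c with
  | nil =>
    cases k with
    | zero => simp [pvCombos] at hc; simp [hc]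
    | succ k => simp [pvCombos] at hc
  | cons x rest ih =>
    cases k with
    | zero => simp [pvCombos] at hc; simp [hc]
    | succ k =>
      simp only [pvCombos, List.mem_append, List.mem_map] at hc
      rcases hc with ⟨c', hc', rfl⟩ | hc
      · intro y hy
        rcases List.mem_cons.mp hy with rfl | hy
        · exact List.mem_cons_self
        · exact List.mem_cons_of_mem _ (ih hc' y hy)
      · intro y hy; exact List.mem_cons_of_mem _ (ih hc y hy)

theorem pvSetAll_some {c : List Int} : ∀ {b : List Int},
    (∀ y ∈ c, -(b.length : Int) ≤ y ∧ y < (b.length : Int)) → ∃ b', pvSetAll b c = some b' := by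
  induction c with
  | nil => intro b _; exact ⟨b, rfl⟩
  | cons i rest ih =>
    intro b hb
    obtain ⟨h1, h2⟩ := hb i List.mem_cons_self
    obtain ⟨cp, hcp⟩ := pvSet_some h1 h2
    have hlen := pvSet_length hcp
    have : ∀ y ∈ rest, -(cp.length : Int) ≤ y ∧ y < (cp.length : Int) := by
      intro y hy; rw [hlen]; exact hb y (List.mem_cons_of_mem _ hy)
    obtain ⟨b', hb'⟩ := ih this
    exact ⟨b', by simp [pvSetAll, hcp, hb']⟩

-- B's foldlM computes the filterMap once every combination can be applied
theorem pvFoldlM_eq (t : Int) : ∀ (cs : List (List Int)) (b : List Int) (acc : List (List Int)),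
    (∀ c ∈ cs, ∃ b', pvSetAll b c = some b') →
    cs.foldlM
      (fun acc c => (pvSetAll b c).map (fun cp => if cp.sum = t then acc ++ [cp] else acc)) acc
    = some (acc ++ cs.filterMap (fun c => (pvSetAll b c).bind (fun cp => if cp.sum = t then some cp else none))) := by
  intro cs
  induction cs with
  | nil => intro b acc _; simp [List.foldlM]
  | cons c cs ih =>
    intro b acc hall
    obtain ⟨cp, hcp⟩ := hall c List.mem_cons_self
    have hrest : ∀ c' ∈ cs, ∃ b', pvSetAll b c' = some b' :=
      fun c' hc' => hall c' (List.mem_cons_of_mem _ hc')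
    simp only [List.foldlM_cons, hcp, Option.map_some, Option.bind_eq_bind, Option.bind_some]
    rw [ih b _ hrest]
    by_cases hs : cp.sum = t <;> simp [hs, hcp]

-- A's loop, for nb ≥ 1 and in-range loop indices, equals the combination enumeration pvG
theorem pvLoopA_eq (t : Int) : ∀ (idxs : List Int) (b : List Int) (nb : Int),
    (∀ y ∈ idxs, -(b.length : Int) ≤ y ∧ y < (b.length : Int)) → 1 ≤ nb →
    pvFillLoopA b nb t idxs = some (pvG b t nb.toNat idxs) := by
  intro idxs
  induction idxs with
  | nil =>
    intro b nb _ hnb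
    obtain ⟨m, hm⟩ : ∃ m, nb.toNat = m + 1 := ⟨nb.toNat - 1, by omega⟩
    simp [pvFillLoopA, pvG, hm, pvCombos]
  | cons i rest ih =>
    intro b nb hb hnb
    obtain ⟨h1, h2⟩ := hb i List.mem_cons_self
    obtain ⟨cp, hcp⟩ := pvSet_some h1 h2
    have hlen := pvSet_length hcp
    have hbrest : ∀ y ∈ rest, -(b.length : Int) ≤ y ∧ y < (b.length : Int) :=
      fun y hy => hb y (List.mem_cons_of_mem _ hy)
    have hrest : pvFillLoopA b nb t rest = some (pvG b t nb.toNat rest) := ih b nb hbrest hnb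
    obtain ⟨m, hm⟩ : ∃ m, nb.toNat = m + 1 := ⟨nb.toNat - 1, by omega⟩
    have hsetall : ∀ c : List Int, pvSetAll b (i :: c) = pvSetAll cp c := by
      intro c; simp [pvSetAll, hcp]
    -- the head-combination contributions equal the recursive solution
    have hhead : (if nb - 1 = 0 then (if cp.sum = t then some [cp] else none)
          else pvFillLoopA cp (nb - 1) t rest).getD []
        = (pvCombos rest m).filterMap
            (fun c => (pvSetAll b (i :: c)).bind (fun cp' => if cp'.sum = t then some cp' else none)) := by
      by_cases hnb1 : nb - 1 = 0
      · have hm0 : m = 0 := by omega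
        subst hm0
        simp only [hnb1, if_true, pvCombos, List.filterMap_cons, List.filterMap_nil]
        rw [hsetall]
        by_cases hs : cp.sum = t <;> simp [hs, pvSetAll]
      · have hnb2 : 1 ≤ nb - 1 := by omega
        have hcprest : ∀ y ∈ rest, -(cp.length : Int) ≤ y ∧ y < (cp.length : Int) := by
          intro y hy; rw [hlen]; exact hbrest y hy
        rw [if_neg hnb1, ih cp (nb - 1) hcprest hnb2]
        have hm' : (nb - 1).toNat = m := by omega
        simp only [Option.getD_some, pvG, hm']
        apply List.filterMap_congr
        intro c _; rw [hsetall]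
    simp only [pvFillLoopA, hcp, hrest]
    simp only [pvG, hm, pvCombos, List.filterMap_append, List.filterMap_map]
    rw [hhead]
    rfl

-- every combination drawn from range(i, len) can be applied to b when -len ≤ i
theorem pvAll_some {b : List Int} {i : Int} (hi : -(b.length : Int) ≤ i) (k : Nat) :
    ∀ c ∈ pvCombos (PySem.List.pyRange i (b.length : Int) 1) k, ∃ b', pvSetAll b c = some b' := by
  intro c hc
  apply pvSetAll_some
  intro y hy
  have := pvCombos_mem hc y hy
  rw [PySem.List.mem_pyRange_one] at this
  exact ⟨by omega, this.2⟩

-- k-combinations of a too-short list: none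
theorem pvCombos_nil : ∀ (xs : List Int) (k : Nat), xs.length < k → pvCombos xs k = [] := by
  intro xs
  induction xs with
  | nil => intro k hk; cases k with | zero => omega | succ k => rfl
  | cons x rest ih =>
    intro k hk
    cases k with
    | zero => omega
    | succ k =>
      have h1 : rest.length < k := by simp at hk; omega
      simp [pvCombos, ih k h1, ih (k + 1) (by omega)]

-- B at nb_candles = 0: the single empty combination, filtered by the sum
theorem pvAlt_zero (b : List Int) (i t : Int) :
    fill_all_chandeliers_recur_alt b i 0 t = some (if b.sum = t then [b] else []) := by
  unfold fill_all_chandeliers_recur_alt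
  have h : ¬ max 0 ((b.length : Int) - i) < 0 := by omega
  rw [if_neg h]
  by_cases hs : b.sum = t <;>
    simp [pvCombos, pvSetAll, List.foldlM, hs]

-- ===== VERDICT (by name: the statements are the Claim_ definitions above) =====
theorem fill_all_chandeliers_recur_spec : Claim_unchanged_fill_all_chandeliers_recur := by
  intro board index nb_candles total_candles _ hpre hnd
  by_cases h0 : nb_candles = 0
  · subst h0
    have hs : board.sum = total_candles := by
      by_contra hs
      exact hnd ⟨rfl, hs⟩
    rw [fill_all_chandeliers_recur, pvAlt_zero]
    simp [hs]
  · have h1 : 1 ≤ nb_candles := by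
      rcases hpre with ⟨hge, _⟩; omega
    have hi : -(board.length : Int) ≤ index := by
      rcases hpre with ⟨_, h | h⟩
      · exact absurd h h0
      · exact h
    have hb : ∀ y ∈ PySem.List.pyRange index (board.length : Int) 1,
        -(board.length : Int) ≤ y ∧ y < (board.length : Int) := by
      intro y hy
      rw [PySem.List.mem_pyRange_one] at hy
      exact ⟨by omega, hy.2⟩
    rw [fill_all_chandeliers_recur]
    simp only [h0, if_false]
    rw [pvLoopA_eq total_candles _ board nb_candles hb h1]
    unfold fill_all_chandeliers_recur_alt
    have hneg : ¬ nb_candles < 0 := by omega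
    by_cases hbig : max 0 ((board.length : Int) - index) < nb_candles
    · have hlen : (PySem.List.pyRange index (board.length : Int) 1).length < nb_candles.toNat := by
        rw [PySem.List.length_pyRange_one]; omega
      simp [hbig, pvG, pvCombos_nil _ _ hlen]
    · rw [if_neg hbig, if_neg hneg,
        pvFoldlM_eq total_candles _ board [] (pvAll_some hi nb_candles.toNat)]
      simp [pvG]

theorem fill_all_chandeliers_recur_changed : Claim_changed_fill_all_chandeliers_recur := by
  unfold Claim_changed_fill_all_chandeliers_recur; decide

theorem fill_all_chandeliers_recur_tight : Claim_exact_fill_all_chandeliers_recur := by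
  intro board index nb_candles total_candles _ _ hd
  obtain ⟨h0, hs⟩ := hd
  subst h0
  rw [fill_all_chandeliers_recur, pvAlt_zero]
  simp [hs]
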